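-- pv_equiv track=rewrite | github.com/syeongkim/Algorithm | 프로그래머스/0/120898. 편지/편지.py | solution
-- ===== SOURCE A (Python) =====
-- def solution(message):
--     answer = 0
--
--     word = message.split()
--     answer += len(word) - 1
--
--     for i in word:
--         answer += len(i)
--
--     answer *= 2
--     return answer
-- ===== SOURCE B (Python) =====
-- def solution(message):
--     nonspace = 0
--     words = 0
--     in_word = False
--     for ch in message:
--         if ch.isspace():
--             in_word = False
--         else:
--             nonspace += 1
--             if not in_word:
--                 words += 1
--             in_word = True
--     return 2 * (nonspace + words - 1)
-- ===== Notes on version B (the rewrite author's own statement) =====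
-- stated objective: alternative
-- what changed: Replaces message.split() plus a loop over the word list with one character pass keeping a non-space counter and a word counter via an in_word flag, never materialising the word list.
import Mathlib
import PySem

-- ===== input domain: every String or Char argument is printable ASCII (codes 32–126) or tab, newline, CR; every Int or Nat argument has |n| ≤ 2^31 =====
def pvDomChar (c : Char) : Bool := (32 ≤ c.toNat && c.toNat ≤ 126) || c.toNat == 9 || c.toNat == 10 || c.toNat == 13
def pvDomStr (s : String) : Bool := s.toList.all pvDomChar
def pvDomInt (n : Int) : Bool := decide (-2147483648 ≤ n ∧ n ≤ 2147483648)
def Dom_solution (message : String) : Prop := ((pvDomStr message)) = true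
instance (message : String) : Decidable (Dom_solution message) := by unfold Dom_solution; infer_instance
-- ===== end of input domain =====

-- B (alternative): replaces message.split() + a loop over the word list by one character pass
-- with a non-space counter and an in_word flag (no intermediate word list).


-- ===== PORT A =====
def solution (message : String) : Int :=
  let answer : Int := 0
  let word := PySem.Str.split₀ message
  let answer := answer + ((word.length : Int) - 1)
  let answer := word.foldl (fun a i => a + PySem.Str.len i) answer
  answer * 2

-- ===== PORT B =====
def solution_altStep (st : Int × Int × Bool) (ch : Char) : Int × Int × Bool :=
  if PySem.Chars.isspace ch then (st.1, st.2.1, false)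
  else (st.1 + 1, (if st.2.2 then st.2.1 else st.2.1 + 1), true)

def solution_alt (message : String) : Int :=
  let st := message.toList.foldl solution_altStep (0, 0, false)
  2 * (st.1 + st.2.1 - 1)

-- ===== PRECONDITION & SPEC =====
def Spec_solution (message : String) (out : Int) : Prop := out = solution_alt message
instance (message : String) (out : Int) : Decidable (Spec_solution message out) := by unfold Spec_solution; infer_instance

-- ===== CLAIM (what is proved, stated in full; the proofs are below) =====
def Claim_equal_solution : Prop := ∀ (message : String), Dom_solution message → Spec_solution message (solution message)

-- ===== LEMMAS AND PROOFS =====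

/-- number of non-space characters -/
def nsCount : List Char → Int
  | [] => 0
  | c :: rest => (if PySem.Chars.isspace c then 0 else 1) + nsCount rest

/-- number of word starts, given whether we are currently inside a word -/
def wCount : List Char → Bool → Int
  | [], _ => 0
  | c :: rest, inw =>
    if PySem.Chars.isspace c then wCount rest false
    else (if inw then 0 else 1) + wCount rest true

/-- the in_word flag at the end of the pass -/
def endInw : List Char → Bool → Bool
  | [], inw => inw
  | c :: rest, _ => endInw rest (!PySem.Chars.isspace c)

lemma foldB (l : List Char) : ∀ ns w inw,
    l.foldl solution_altStep (ns, w, inw) =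
      (ns + nsCount l, w + wCount l inw, endInw l inw) := by
  induction l with
  | nil => intro ns w inw; simp [nsCount, wCount, endInw]
  | cons c rest ih =>
    intro ns w inw
    simp only [List.foldl_cons, solution_altStep, nsCount, wCount, endInw]
    by_cases hs : PySem.Chars.isspace c
    · simp [hs, ih]; try omega
    · cases inw <;> simp [hs, ih] <;> try omega

def sumLen : List (List Char) → Int
  | [] => 0
  | w :: rest => (w.length : Int) + sumLen rest

lemma sumLen_append (a b : List (List Char)) : sumLen (a ++ b) = sumLen a + sumLen b := by
  induction a with
  | nil => simp [sumLen]
  | cons w r ih => simp [sumLen, ih]; ring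

lemma sumLen_reverse (a : List (List Char)) : sumLen a.reverse = sumLen a := by
  induction a with
  | nil => rfl
  | cons w r ih => simp [sumLen, List.reverse_cons, sumLen_append, ih]; ring

lemma go_sum (rest : List Char) : ∀ cur acc,
    sumLen (PySem.Chars.split₀.go rest cur acc) = sumLen acc + (cur.length : Int) + nsCount rest := by
  induction rest with
  | nil =>
    intro cur acc
    simp only [PySem.Chars.split₀.go, nsCount]
    by_cases h : cur = []
    · simp [h, sumLen_reverse]
    · simp [h, sumLen_append, sumLen_reverse, sumLen]; try ring
  | cons c r ih =>
    intro cur acc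
    simp only [PySem.Chars.split₀.go, nsCount]
    by_cases hs : PySem.Chars.isspace c
    · by_cases hc : cur = []
      · simp [hs, hc, ih]
      · simp [hs, hc, ih, sumLen]; ring
    · simp [hs, ih]; ring

lemma go_count (rest : List Char) : ∀ cur acc,
    ((PySem.Chars.split₀.go rest cur acc).length : Int) =
      acc.length + (if cur.isEmpty then 0 else 1) + wCount rest (!cur.isEmpty) := by
  induction rest with
  | nil =>
    intro cur acc
    simp only [PySem.Chars.split₀.go, wCount]
    by_cases h : cur = [] <;> simp [h]
  | cons c r ih =>
    intro cur acc
    simp only [PySem.Chars.split₀.go, wCount]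
    by_cases hs : PySem.Chars.isspace c
    · by_cases hc : cur = []
      · simp [hs, hc, ih]
      · simp [hs, hc, ih]; try ring
    · by_cases hc : cur = []
      · simp [hs, hc, ih]; try ring
      · simp [hs, hc, ih]

lemma foldA (ws : List (List Char)) : ∀ init : Int,
    (ws.map String.ofList).foldl (fun a i => a + PySem.Str.len i) init = init + sumLen ws := by
  induction ws with
  | nil => intro init; simp [sumLen]
  | cons w r ih =>
    intro init
    simp only [List.map_cons, List.foldl_cons]
    rw [ih]
    simp [sumLen, PySem.Str.len]
    ring

-- ===== VERDICT (by name: the statement is the Claim_ definition above) =====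
theorem solution_spec : Claim_equal_solution := by
  intro message _
  unfold Spec_solution solution solution_alt
  simp only [PySem.Str.split₀, List.length_map]
  rw [foldA, foldB]
  have hs := go_sum message.toList [] []
  have hc := go_count message.toList [] []
  simp only [PySem.Chars.split₀] at *
  simp [sumLen] at hs hc ⊢
  rw [hs, hc]
  ring
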